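-- pv_equiv track=rewrite | github.com/AV090/telegram-bot | cricket_api_parser.py | format_dict_str
-- ===== SOURCE A (Python) =====
-- def format_dict_str(di):
--     di_str = str(di)
--     di_str = di_str.replace("}", "")
--     di_str = di_str.replace("{", "")
--     temp = ""
--     di_str = di_str.split(",")
--     for item in range(0, len(di_str), 4):
--         temp += " ".join(di_str[item:item + 4]) + "\n"
--     return temp
-- ===== SOURCE B (Python) =====
-- def format_dict_str(di):
--     s = str(di).replace("}", "").replace("{", "")
--     out = ""
--     buf = []
--     for item in s.split(","):
--         buf.append(item)
--         if len(buf) == 4: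
--             out += " ".join(buf) + "\n"
--             buf = []
--     if buf:
--         out += " ".join(buf) + "\n"
--     return out
-- ===== Notes on version B (the rewrite author's own statement) =====
-- stated objective: alternative
-- what changed: A groups the comma-split items by iterating range(0, len, 4) and slicing out each 4-item window; B makes one item-by-item pass with a buffer list that is flushed (joined and appended with a newline) whenever it reaches 4 items, with a final flush of the non-empty remainder.
import Mathlib
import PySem

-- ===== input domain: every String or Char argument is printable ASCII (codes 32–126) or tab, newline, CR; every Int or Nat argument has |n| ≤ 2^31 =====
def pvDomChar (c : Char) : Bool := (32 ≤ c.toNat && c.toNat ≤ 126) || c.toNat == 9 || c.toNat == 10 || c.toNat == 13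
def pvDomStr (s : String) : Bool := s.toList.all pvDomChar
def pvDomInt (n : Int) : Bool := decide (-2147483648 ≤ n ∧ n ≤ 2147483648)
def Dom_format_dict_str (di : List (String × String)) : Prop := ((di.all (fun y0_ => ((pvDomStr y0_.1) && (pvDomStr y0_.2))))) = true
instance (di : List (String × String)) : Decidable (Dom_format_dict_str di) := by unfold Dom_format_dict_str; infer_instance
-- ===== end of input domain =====

-- B replaces A's range(0, len, 4)-with-slices grouping by a single item-by-item pass with a
-- buffer flushed at length 4 (objective: alternative decomposition, same cost).

-- ===== PORT A =====
-- shared helper: Python repr of a str, hand-ported (exact on the Dom alphabet: printable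
-- ASCII stays literal, backslash and the chosen quote are escaped, tab/newline/CR become
-- \t \n \r; double quotes are used iff the string contains ' but not ")
def pyReprStr (s : String) : List Char :=
  let cs := s.toList
  let q : Char := if cs.contains '\'' && !cs.contains '"' then '"' else '\''
  q :: cs.flatMap (fun c =>
    if c = '\\' then ['\\', '\\']
    else if c = q then ['\\', q]
    else if c = '\t' then ['\\', 't']
    else if c = '\n' then ['\\', 'n']
    else if c = '\r' then ['\\', 'r']
    else [c]) ++ [q]

-- shared helper: str(di) for a dict of strings, hand-ported ("{" + ", ".join of "k_repr: v_repr"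
-- + "}"; duplicate keys collapse as in a Python dict via PySem.Dict.ofList)
def pyStrDict (di : List (String × String)) : List Char :=
  '{' :: PySem.Chars.join [',', ' ']
      (((PySem.Dict.ofList di).items).map
        (fun p => pyReprStr p.1 ++ [':', ' '] ++ pyReprStr p.2)) ++ ['}']

def format_dict_str (di : List (String × String)) : String :=
  let di_str := pyStrDict di
  let di_str := PySem.Chars.replace di_str ['}'] []
  let di_str := PySem.Chars.replace di_str ['{'] []
  let temp : List Char := []
  let parts := PySem.Chars.splitOn di_str [',']
  let temp := (PySem.List.pyRange 0 (PySem.List.len parts) 4).foldl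
    (fun temp item =>
      temp ++ PySem.Chars.join [' '] (PySem.List.slice parts (some item) (some (item + 4))) ++ ['\n'])
    temp
  String.ofList temp

-- ===== PORT B =====
def format_dict_str_alt (di : List (String × String)) : String :=
  let s := PySem.Chars.replace (PySem.Chars.replace (pyStrDict di) ['}'] []) ['{'] []
  let st := (PySem.Chars.splitOn s [',']).foldl
    (fun (st : List (List Char) × List Char) item =>
      let buf := st.1 ++ [item]
      if buf.length = 4 then ([], st.2 ++ PySem.Chars.join [' '] buf ++ ['\n'])
      else (buf, st.2))
    ([], [])
  String.ofList (if st.1 = [] then st.2 else st.2 ++ PySem.Chars.join [' '] st.1 ++ ['\n'])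

-- ===== PRECONDITION & SPEC =====
def Spec_format_dict_str (di : List (String × String)) (out : String) : Prop := out = format_dict_str_alt di
instance (di : List (String × String)) (out : String) : Decidable (Spec_format_dict_str di out) := by unfold Spec_format_dict_str; infer_instance

-- ===== CLAIM (what is proved, stated in full; the proofs are below) =====
def Claim_equal_format_dict_str : Prop := ∀ (di : List (String × String)), Dom_format_dict_str di → Spec_format_dict_str di (format_dict_str di)

-- ===== LEMMAS AND PROOFS =====

-- groups of 4 joined by ' ' and terminated by '\n': the common meaning of both loops
def chunk4 (l : List (List Char)) : List Char :=
  if l = [] then []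
  else PySem.Chars.join [' '] (l.take 4) ++ '\n' :: chunk4 (l.drop 4)
termination_by l.length
decreasing_by
  have : l.length ≠ 0 := by simpa [List.length_eq_zero_iff] using ‹l ≠ []›
  simp [List.length_drop]; omega

-- B's loop body and final flush, as named functions (definitionally those of format_dict_str_alt)
def stepB (st : List (List Char) × List Char) (item : List Char) : List (List Char) × List Char :=
  let buf := st.1 ++ [item]
  if buf.length = 4 then ([], st.2 ++ PySem.Chars.join [' '] buf ++ ['\n'])
  else (buf, st.2)

def finB (st : List (List Char) × List Char) : List Char :=
  if st.1 = [] then st.2 else st.2 ++ PySem.Chars.join [' '] st.1 ++ ['\n']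

theorem pyRange_pos_nil (a b s : Int) (hs : 0 < s) (h : b ≤ a) :
    PySem.List.pyRange a b s = [] := by
  rw [PySem.List.pyRange_of_pos _ _ hs]
  simp [show ¬ a < b by omega]

theorem pyRange_pos_cons (a b s : Int) (hs : 0 < s) (h : a < b) :
    PySem.List.pyRange a b s = a :: PySem.List.pyRange (a+s) b s := by
  rw [PySem.List.pyRange_of_pos _ _ hs, PySem.List.pyRange_of_pos _ _ hs]
  by_cases h3 : a + s < b
  · have h1 : ((b - a + s - 1) / s).toNat = ((b - (a+s) + s - 1) / s).toNat + 1 := by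
      have he : (b - a + s - 1) / s = (b - (a+s) + s - 1) / s + 1 := by
        rw [show b - a + s - 1 = (b - (a+s) + s - 1) + 1 * s by ring,
          Int.add_mul_ediv_right _ _ (by omega)]
      have h2 : 0 ≤ (b - (a+s) + s - 1) / s := Int.ediv_nonneg (by omega) (by omega)
      omega
    simp only [h, if_pos, h3, h1, List.range_succ_eq_map, List.map_cons, List.map_map]
    congr 1
    · push_cast; ring
    · exact List.map_congr_left fun k _ => by simp only [Function.comp]; push_cast; ring
  · have h0 : (b - (a+s) + s - 1) / s = 0 := by
      apply Int.ediv_eq_zero_of_lt <;> omega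
    have h1 : ((b - a + s - 1) / s).toNat = 1 := by
      have he : (b - a + s - 1) / s = 1 := by
        rw [show b - a + s - 1 = (b - (a+s) + s - 1) + 1 * s by ring,
          Int.add_mul_ediv_right _ _ (by omega), h0]
        norm_num
      omega
    simp [h, h3, h1]

-- A's loop, started at offset k, appends chunk4 of the remaining suffix
theorem loopA_eq_chunk4 (parts : List (List Char)) (k : Nat) (acc : List Char) :
    (PySem.List.pyRange (k : Int) (PySem.List.len parts) 4).foldl
      (fun temp item =>
        temp ++ PySem.Chars.join [' '] (PySem.List.slice parts (some item) (some (item + 4))) ++ ['\n'])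
      acc = acc ++ chunk4 (parts.drop k) := by
  rw [PySem.List.len_eq]
  by_cases hk : parts.length ≤ k
  · rw [pyRange_pos_nil _ _ _ (by norm_num) (by exact_mod_cast hk)]
    simp [chunk4, List.drop_eq_nil_of_le hk]
  · rw [Nat.not_le] at hk
    rw [pyRange_pos_cons _ _ _ (by norm_num) (by exact_mod_cast hk), List.foldl_cons]
    have hs : PySem.List.slice parts (some (k:Int)) (some ((k:Int)+4)) = (parts.drop k).take 4 := by
      rw [show ((k:Int)+4) = ((k:Int) + ((4:Nat):Int)) by norm_num]
      exact PySem.List.slice_natCast_add parts k 4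
    have h4 : ((k:Int) + 4) = ((k + 4 : Nat) : Int) := by push_cast; ring
    rw [hs, h4, ← PySem.List.len_eq, loopA_eq_chunk4 parts (k+4)]
    have hne : ¬ parts.drop k = [] := by
      simp only [List.drop_eq_nil_iff]
      omega
    conv_rhs => rw [chunk4, if_neg hne]
    simp [List.drop_drop]
termination_by parts.length - k

-- B's loop with a partially filled buffer, then the final flush
theorem loopB_eq_chunk4 : ∀ (l buf : List (List Char)) (acc : List Char),
    buf.length < 4 → finB (l.foldl stepB (buf, acc)) = acc ++ chunk4 (buf ++ l)
  | [], buf, acc, hb => by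
    simp only [List.foldl_nil, finB, List.append_nil]
    by_cases h : buf = []
    · simp [h, chunk4]
    · rw [if_neg h, chunk4, if_neg (by simpa using h),
        List.take_of_length_le (by omega), List.drop_eq_nil_of_le (by omega), chunk4]
      simp
  | x :: t, buf, acc, hb => by
    simp only [List.foldl_cons, stepB]
    by_cases h4 : (buf ++ [x]).length = 4
    · rw [if_pos h4, loopB_eq_chunk4 t [] _ (by norm_num)]
      rw [show buf ++ x :: t = (buf ++ [x]) ++ t by simp]
      conv_rhs => rw [chunk4, if_neg (by simp)]
      rw [List.take_left' h4, List.drop_left' h4]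
      simp
    · rw [if_neg h4, loopB_eq_chunk4 t (buf ++ [x]) acc (by simp at h4 ⊢; omega)]
      simp

-- instances of the two loop lemmas at the ports' actual starting states
theorem loopA0 (parts : List (List Char)) :
    (PySem.List.pyRange 0 (PySem.List.len parts) 4).foldl
      (fun temp item =>
        temp ++ PySem.Chars.join [' '] (PySem.List.slice parts (some item) (some (item + 4))) ++ ['\n'])
      [] = chunk4 parts := by
  simpa using loopA_eq_chunk4 parts 0 []

theorem loopB0 (parts : List (List Char)) :
    finB (parts.foldl stepB ([], [])) = chunk4 parts := by
  simpa using loopB_eq_chunk4 parts [] [] (by norm_num)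

-- ===== VERDICT (by name: the statement is the Claim_ definition above) =====
theorem format_dict_str_spec : Claim_equal_format_dict_str := by
  intro di _
  unfold Spec_format_dict_str
  have hA : format_dict_str di =
      String.ofList (chunk4 (PySem.Chars.splitOn
        (PySem.Chars.replace (PySem.Chars.replace (pyStrDict di) ['}'] []) ['{'] []) [','])) := by
    rw [show format_dict_str di =
        String.ofList ((PySem.List.pyRange 0 (PySem.List.len (PySem.Chars.splitOn
          (PySem.Chars.replace (PySem.Chars.replace (pyStrDict di) ['}'] []) ['{'] []) [','])) 4).foldl
          (fun temp item =>
            temp ++ PySem.Chars.join [' '] (PySem.List.slice (PySem.Chars.splitOn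
              (PySem.Chars.replace (PySem.Chars.replace (pyStrDict di) ['}'] []) ['{'] []) [','])
              (some item) (some (item + 4))) ++ ['\n']) []) from rfl, loopA0]
  have hB : format_dict_str_alt di =
      String.ofList (finB ((PySem.Chars.splitOn
        (PySem.Chars.replace (PySem.Chars.replace (pyStrDict di) ['}'] []) ['{'] []) [',']).foldl
        stepB ([], []))) := rfl
  rw [hA, hB, loopB0]
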